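-- pv_equiv track=rewrite | github.com/ZipBomb/alexa-chess-openings | chess_openings.py | get_opening_by_eco
-- ===== SOURCE A (Python) =====
-- def get_opening_by_eco(eco, openings_by_eco, keys_by_eco, limit=None):
--     keys = keys_by_eco
--     matches = list(filter(lambda key: key == eco, keys))
--
--     if limit is not None and limit > 0:
--         matches = matches[:limit]
--
--     result = []
--     for match in matches:
--         result.append(openings_by_eco[match])
--
--     return result
-- ===== SOURCE B (Python) =====
-- def get_opening_by_eco(eco, openings_by_eco, keys_by_eco, limit=None):
--     cap = limit if limit is not None and limit > 0 else None
--     result = []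
--     for key in keys_by_eco:
--         if key == eco:
--             result.append(openings_by_eco[key])
--             if cap is not None and len(result) >= cap:
--                 break
--     return result
-- ===== Notes on version B (the rewrite author's own statement) =====
-- stated objective: alternative
-- what changed: A runs three staged passes (filter the keys, slice to the limit, then a lookup-and-append loop over the matches); B is one fused pass over keys_by_eco with an accumulator that looks up and appends on each match and breaks early once the limit is reached, so the match list and slice never exist.
-- outside the precondition, e.g. on get_opening_by_eco('A', {}, ['A'], None): A raises KeyError, B raises KeyError
import Mathlib
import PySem

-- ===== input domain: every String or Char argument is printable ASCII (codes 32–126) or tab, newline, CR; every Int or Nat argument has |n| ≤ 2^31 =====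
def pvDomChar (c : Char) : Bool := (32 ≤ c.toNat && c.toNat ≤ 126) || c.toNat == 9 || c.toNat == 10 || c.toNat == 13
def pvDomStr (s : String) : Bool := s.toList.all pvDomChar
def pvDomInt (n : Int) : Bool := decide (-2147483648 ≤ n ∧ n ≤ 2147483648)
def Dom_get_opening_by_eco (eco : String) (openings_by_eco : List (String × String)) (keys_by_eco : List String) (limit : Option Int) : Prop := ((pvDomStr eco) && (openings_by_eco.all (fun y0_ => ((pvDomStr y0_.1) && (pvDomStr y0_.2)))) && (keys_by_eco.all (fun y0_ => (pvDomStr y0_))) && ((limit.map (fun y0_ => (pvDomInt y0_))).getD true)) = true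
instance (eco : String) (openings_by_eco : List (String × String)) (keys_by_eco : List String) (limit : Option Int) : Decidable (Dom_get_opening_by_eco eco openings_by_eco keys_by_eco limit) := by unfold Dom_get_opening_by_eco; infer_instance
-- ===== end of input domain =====

-- B fuses A's three staged passes (filter, slice, lookup-and-append loop) into a single
-- pass over keys_by_eco with an accumulator and an early exit at the limit ("alternative").

-- ===== PORT A =====
def get_opening_by_eco (eco : String) (openings_by_eco : List (String × String)) (keys_by_eco : List String) (limit : Option Int) : List String :=
  let keys := keys_by_eco
  let ms := keys.filter (fun key => key == eco)
  let ms := match limit with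
    | some l => if l > 0 then PySem.List.slice ms none (some l) else ms
    | none => ms
  -- openings_by_eco[match]: first-match dict lookup; KeyError (lookup = none) is excluded by Pre_
  ms.foldl (fun result m => result ++ [(openings_by_eco.lookup m).getD ""]) []

-- ===== PORT B =====
-- B's single for-loop with early break, as structural recursion over the keys carrying `result`.
def pvAltLoop (eco : String) (openings_by_eco : List (String × String)) (cap : Option Int) : List String → List String → List String
  | [], result => result
  | key :: rest, result =>
    if key == eco then
      -- openings_by_eco[key]: first-match dict lookup; KeyError excluded by Pre_
      let r := result ++ [(openings_by_eco.lookup key).getD ""]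
      match cap with
      | some c => if (r.length : Int) ≥ c then r else pvAltLoop eco openings_by_eco cap rest r
      | none => pvAltLoop eco openings_by_eco cap rest r
    else pvAltLoop eco openings_by_eco cap rest result

def get_opening_by_eco_alt (eco : String) (openings_by_eco : List (String × String)) (keys_by_eco : List String) (limit : Option Int) : List String :=
  let cap := match limit with
    | some l => if l > 0 then some l else none
    | none => none
  pvAltLoop eco openings_by_eco cap keys_by_eco []

-- ===== PRECONDITION & SPEC =====
-- Pre_ excludes exactly the inputs where the Python raises KeyError (both A and B do):
-- eco occurs in keys_by_eco but is not a key of openings_by_eco.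
def Pre_get_opening_by_eco (eco : String) (openings_by_eco : List (String × String)) (keys_by_eco : List String) (limit : Option Int) : Prop :=
  eco ∈ keys_by_eco → eco ∈ openings_by_eco.map Prod.fst
instance (eco : String) (openings_by_eco : List (String × String)) (keys_by_eco : List String) (limit : Option Int) : Decidable (Pre_get_opening_by_eco eco openings_by_eco keys_by_eco limit) := by unfold Pre_get_opening_by_eco; infer_instance
def pvWitness_get_opening_by_eco : String × (List (String × String)) × List String × Option Int :=
  ("B00", [("B00", "King's Pawn")], ["B00", "A10", "B00"], some 5)

def Spec_get_opening_by_eco (eco : String) (openings_by_eco : List (String × String)) (keys_by_eco : List String) (limit : Option Int) (out : List String) : Prop := out = get_opening_by_eco_alt eco openings_by_eco keys_by_eco limit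
instance (eco : String) (openings_by_eco : List (String × String)) (keys_by_eco : List String) (limit : Option Int) (out : List String) : Decidable (Spec_get_opening_by_eco eco openings_by_eco keys_by_eco limit out) := by unfold Spec_get_opening_by_eco; infer_instance

-- ===== CLAIM =====
def Claim_equal_get_opening_by_eco : Prop := ∀ (eco : String) (openings_by_eco : List (String × String)) (keys_by_eco : List String) (limit : Option Int), Dom_get_opening_by_eco eco openings_by_eco keys_by_eco limit → Pre_get_opening_by_eco eco openings_by_eco keys_by_eco limit → Spec_get_opening_by_eco eco openings_by_eco keys_by_eco limit (get_opening_by_eco eco openings_by_eco keys_by_eco limit)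

-- ===== LEMMAS AND PROOFS =====

-- A's filter keeps only copies of eco.
theorem filter_beq_replicate (eco : String) (keys : List String) :
    keys.filter (fun key => key == eco) = List.replicate (keys.count eco) eco := by
  induction keys with
  | nil => simp
  | cons k ks ih =>
    by_cases h : k = eco
    · subst h; simp [ih, List.replicate_succ]
    · have h2 : ¬ eco = k := fun e => h e.symm
      simp [List.count_cons, h, h2, ih]

-- A's append loop over a replicated list yields the replicated lookup.
theorem foldl_append_replicate {α β : Type} (f : α → β) (a : α) (n : Nat) (init : List β) :
    (List.replicate n a).foldl (fun result m => result ++ [f m]) init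
      = init ++ List.replicate n (f a) := by
  induction n generalizing init with
  | zero => simp
  | succ n ih => simp [List.replicate_succ, ih]

-- B's loop without a cap appends one lookup per match.
theorem pvAltLoop_none (eco : String) (ob : List (String × String)) (keys result : List String) :
    pvAltLoop eco ob none keys result
      = result ++ List.replicate (keys.count eco) ((ob.lookup eco).getD "") := by
  induction keys generalizing result with
  | nil => simp [pvAltLoop]
  | cons k ks ih =>
    by_cases h : k = eco
    · subst h
      simp [pvAltLoop, ih, List.replicate_succ, List.append_assoc]
    · have hb : (k == eco) = false := beq_eq_false_iff_ne.mpr h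
      have h2 : (eco == k) = false := beq_eq_false_iff_ne.mpr fun e => h e.symm
      simp [pvAltLoop, hb, List.count_cons, h2, ih]

-- Unfolding equation for one step of B's capped loop.
theorem pvAltLoop_cons_some (eco : String) (ob : List (String × String)) (c : Int)
    (k : String) (ks result : List String) :
    pvAltLoop eco ob (some c) (k :: ks) result =
      if k == eco then
        (if ((result ++ [(ob.lookup k).getD ""]).length : Int) ≥ c then result ++ [(ob.lookup k).getD ""]
         else pvAltLoop eco ob (some c) ks (result ++ [(ob.lookup k).getD ""]))
      else pvAltLoop eco ob (some c) ks result := rfl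

-- B's loop with a positive cap: invariant on the accumulated result's length.
theorem pvAltLoop_some (eco : String) (ob : List (String × String)) (c : Int)
    (keys : List String) (result : List String) (h : (result.length : Int) < c) :
    pvAltLoop eco ob (some c) keys result
      = result ++ List.replicate (min (c - result.length).toNat (keys.count eco)) ((ob.lookup eco).getD "") := by
  induction keys generalizing result with
  | nil => simp [pvAltLoop]
  | cons k ks ih =>
    by_cases hk : k = eco
    · subst hk
      rw [pvAltLoop_cons_some, if_pos (beq_self_eq_true k)]
      by_cases hstop : ((result ++ [(ob.lookup k).getD ""]).length : Int) ≥ c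
      · rw [if_pos hstop]
        have hm : min (c.toNat - result.length) (List.count k ks + 1) = 1 := by
          simp only [List.length_append, List.length_cons, List.length_nil] at hstop
          omega
        simp [hm]
      · have hlen : ((result ++ [(ob.lookup k).getD ""]).length : Int) < c := lt_of_not_ge hstop
        rw [if_neg hstop, ih _ hlen]
        have hmin : min (c - ((result ++ [(ob.lookup k).getD ""]).length : Int)).toNat (ks.count k) + 1
            = min (c - (result.length : Int)).toNat ((k :: ks).count k) := by
          simp only [List.length_append, List.length_cons, List.length_nil, List.count_cons,
            beq_self_eq_true, if_true]
          omega
        rw [List.append_assoc]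
        congr 1
        rw [List.singleton_append, ← List.replicate_succ, hmin]
    · have hb : (k == eco) = false := beq_eq_false_iff_ne.mpr hk
      rw [pvAltLoop_cons_some, if_neg (by simp [hb]), ih _ h]
      simp [hk]

-- ===== VERDICT =====
theorem get_opening_by_eco_spec : Claim_equal_get_opening_by_eco := by
  intro eco ob keys limit _hDom _hPre
  unfold Spec_get_opening_by_eco get_opening_by_eco get_opening_by_eco_alt
  simp only [filter_beq_replicate]
  cases limit with
  | none =>
    rw [pvAltLoop_none, foldl_append_replicate (fun m => (ob.lookup m).getD "") eco _ []]
  | some l =>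
    by_cases hl : l > 0
    · simp only [hl, if_true]
      rw [PySem.List.slice_to _ (le_of_lt hl), List.take_replicate,
        foldl_append_replicate (fun m => (ob.lookup m).getD "") eco _ [],
        pvAltLoop_some eco ob l keys [] (by simpa using hl)]
      simp only [List.length_nil, Nat.cast_zero, sub_zero, List.nil_append]
    · simp only [hl, if_false]
      rw [pvAltLoop_none, foldl_append_replicate (fun m => (ob.lookup m).getD "") eco _ []]
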